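-- pv_equiv track=rewrite | github.com/JamesMakovics/PythonClassProjects | Programs/test.py | formatTelephone
-- ===== SOURCE A (Python) =====
-- def formatTelephone(str):
--     #will return, Sample: xxx-xxx-xxxx
--     newNumber = ""
--     count = 1
--     finalDigits = 10
--     for numbers in str:
--         if numbers.isdigit() and count != 3:
--             newNumber += numbers
--             count += 1
--             finalDigits += -1
--         elif numbers.isdigit() and count == 3 and finalDigits > 4:
--             newNumber += numbers + "-"
--             count = 1
--             finalDigits += -1
--
--         elif numbers.isdigit() and finalDigits <= 4:
--             newNumber += numbers
--
--     return newNumber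
-- ===== SOURCE B (Python) =====
-- def formatTelephone(str):
--     digits = [c for c in str if c.isdigit()]
--     out = ""
--     for i, c in enumerate(digits):
--         out += c
--         if i == 2 or i == 5:
--             out += "-"
--     return out
-- ===== Notes on version B (the rewrite author's own statement) =====
-- stated objective: simpler
-- what changed: Replaces A's three-branch count/finalDigits state machine with a filter of the digits followed by one enumerate pass that emits a dash purely after indices 2 and 5.
import Mathlib
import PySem

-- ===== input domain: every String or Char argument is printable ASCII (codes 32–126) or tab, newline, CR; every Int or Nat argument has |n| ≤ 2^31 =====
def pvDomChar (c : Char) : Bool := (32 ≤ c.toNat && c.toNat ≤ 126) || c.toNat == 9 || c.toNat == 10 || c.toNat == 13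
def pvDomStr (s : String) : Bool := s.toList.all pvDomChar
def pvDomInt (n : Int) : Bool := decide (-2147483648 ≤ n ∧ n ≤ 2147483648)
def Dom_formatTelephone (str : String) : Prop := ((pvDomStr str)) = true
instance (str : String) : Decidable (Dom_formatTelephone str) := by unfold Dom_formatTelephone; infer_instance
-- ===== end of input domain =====

-- B replaces A's count/finalDigits state machine by a digit filter plus one enumerate
-- pass that emits '-' purely after indices 2 and 5 (objective: simpler).

-- ===== PORT A =====
-- one loop step of A: the three-branch if/elif chain over (newNumber, count, finalDigits)
def faStep (st : String × Int × Int) (c : Char) : String × Int × Int :=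
  let (newNumber, count, finalDigits) := st
  if PySem.Chars.isdigit c ∧ count ≠ 3 then
    (newNumber.push c, count + 1, finalDigits + (-1))
  else if PySem.Chars.isdigit c ∧ count = 3 ∧ finalDigits > 4 then
    ((newNumber.push c).push '-', 1, finalDigits + (-1))
  else if PySem.Chars.isdigit c ∧ finalDigits ≤ 4 then
    (newNumber.push c, count, finalDigits)
  else
    (newNumber, count, finalDigits)

def formatTelephone (str : String) : String :=
  (str.toList.foldl faStep ("", 1, 10)).1

-- ===== PORT B =====
-- one loop step of B: append the digit, then '-' iff its index is 2 or 5
def fbStep (out : String) (p : Int × Char) : String :=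
  let out := out.push p.2
  if p.1 = 2 ∨ p.1 = 5 then out.push '-' else out

def formatTelephone_alt (str : String) : String :=
  let digits := str.toList.filter (fun c => PySem.Chars.isdigit c)
  (PySem.List.enumerate digits).foldl fbStep ""

-- ===== PRECONDITION & SPEC =====
def Spec_formatTelephone (str : String) (out : String) : Prop := out = formatTelephone_alt str
instance (str : String) (out : String) : Decidable (Spec_formatTelephone str out) := by unfold Spec_formatTelephone; infer_instance

-- ===== CLAIM (what is proved, stated in full; the proofs are below) =====
def Claim_equal_formatTelephone : Prop := ∀ (str : String), Dom_formatTelephone str → Spec_formatTelephone str (formatTelephone str)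

-- ===== LEMMAS AND PROOFS =====

-- A's state after processing k digits: (count, finalDigits)
def faState (k : Int) : Int × Int :=
  if k < 8 then (k % 3 + 1, 10 - k) else (3, 2)

-- A's step skips non-digits, so folding over the list equals folding over its digit filter
theorem faFold_filter (l : List Char) (st : String × Int × Int) :
    l.foldl faStep st = (l.filter (fun c => PySem.Chars.isdigit c)).foldl faStep st := by
  induction l generalizing st with
  | nil => rfl
  | cons c t ih =>
    by_cases h : PySem.Chars.isdigit c = true
    · simp [List.filter_cons, h, ih]
    · have hid : faStep st c = st := by
        obtain ⟨a, b, d⟩ := st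
        simp [faStep, h]
      simp [h, List.foldl_cons, hid, ih]

-- main invariant: over a list of digits, A's fold from state faState k equals B's fold enumerated from k
theorem main_inv (ds : List Char) (hds : ∀ c ∈ ds, PySem.Chars.isdigit c = true)
    (k : Int) (hk : 0 ≤ k) (acc : String) :
    (ds.foldl faStep (acc, faState k)).1
      = (PySem.List.enumerate ds k).foldl fbStep acc := by
  induction ds generalizing k acc with
  | nil => rfl
  | cons c t ih =>
    have hc : PySem.Chars.isdigit c = true := hds c (List.mem_cons_self ..)
    have ht : ∀ x ∈ t, PySem.Chars.isdigit x = true := fun x hx => hds x (List.mem_cons_of_mem _ hx)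
    rw [PySem.List.enumerate_cons, List.foldl_cons, List.foldl_cons]
    have hstep : faStep (acc, faState k) c = (fbStep acc (k, c), faState (k + 1)) := by
      by_cases h8 : k < 8
      · have hfa : faState k = (k % 3 + 1, 10 - k) := if_pos h8
        by_cases hm : k % 3 = 2
        · -- count = 3; since k < 8 and k % 3 = 2, k ∈ {2, 5}, so finalDigits > 4: dash branch
          have hk25 : k = 2 ∨ k = 5 := by omega
          rcases hk25 with rfl | rfl <;>
            simp [faStep, fbStep, faState, hc]
        · simp only [faStep, fbStep, hfa]
          rw [if_pos ⟨hc, by omega⟩, if_neg (show ¬ (k = 2 ∨ k = 5) by omega)]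
          unfold faState
          by_cases h7 : k = 7
          · subst h7; norm_num
          · rw [if_pos (show k + 1 < 8 by omega)]
            simp only [Prod.mk.injEq]
            refine ⟨trivial, by omega, by omega⟩
      · -- k ≥ 8: count = 3, finalDigits = 2 ≤ 4: plain-append branch
        have hfa : faState k = (3, 2) := if_neg h8
        have hfa' : faState (k + 1) = (3, 2) := if_neg (by omega)
        simp only [faStep, fbStep, hfa, hfa']
        rw [if_neg (by simp), if_neg (by simp), if_pos ⟨hc, by norm_num⟩,
            if_neg (show ¬ (k = 2 ∨ k = 5) by omega)]
    rw [hstep]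
    exact ih ht (k + 1) (by omega) _

-- ===== VERDICT (by name: the statement is the Claim_ definition above) =====
theorem formatTelephone_spec : Claim_equal_formatTelephone := by
  intro s _
  show formatTelephone s = formatTelephone_alt s
  unfold formatTelephone formatTelephone_alt
  rw [faFold_filter]
  have := main_inv (s.toList.filter (fun c => PySem.Chars.isdigit c))
    (fun c hc => (List.mem_filter.mp hc).2) 0 (by norm_num) ""
  simpa [faState, PySem.List.enumerate] using this
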